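-- pv_equiv track=rewrite | github.com/miron2314/Lab-7 | пример 2.py | count_positive_between_min_max
-- ===== SOURCE A (Python) =====
-- def count_positive_between_min_max(lst):
--     if not lst:
--         return 0
--     min_value = min(lst)
--     max_value = max(lst)
--     min_index = lst.index(min_value)
--     max_index = lst.index(max_value)
--     start_index = min(min_index, max_index) + 1
--     end_index = max(min_index, max_index)
--     positive_count = sum(1 for x in lst[start_index:end_index] if x > 0)
--     return positive_count
-- ===== SOURCE B (Python) =====
-- def count_positive_between_min_max(lst):
--     if not lst:
--         return 0
--     # prefix counts: pos[k] = number of positives among lst[:k]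
--     pos = [0]
--     acc = 0
--     for x in lst:
--         acc += x > 0
--         pos.append(acc)
--     # first occurrences of min and max via lexicographic tuple order
--     _, mi = min((x, i) for i, x in enumerate(lst))
--     _, nma = max((x, -i) for i, x in enumerate(lst))
--     ma = -nma
--     lo, hi = (mi, ma) if mi <= ma else (ma, mi)
--     return pos[hi] - pos[lo + 1] if lo + 1 <= hi else 0
-- ===== Notes on version B (the rewrite author's own statement) =====
-- stated objective: alternative
-- what changed: B builds a prefix-sum array of positive counts (so the between-count is an O(1) difference of two prefix sums, no slice scan) and obtains the first min/max indices by folding a lexicographic tuple order over enumerate (min((x,i)), max((x,-i))) instead of min/max plus two list.index scans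
import Mathlib
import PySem

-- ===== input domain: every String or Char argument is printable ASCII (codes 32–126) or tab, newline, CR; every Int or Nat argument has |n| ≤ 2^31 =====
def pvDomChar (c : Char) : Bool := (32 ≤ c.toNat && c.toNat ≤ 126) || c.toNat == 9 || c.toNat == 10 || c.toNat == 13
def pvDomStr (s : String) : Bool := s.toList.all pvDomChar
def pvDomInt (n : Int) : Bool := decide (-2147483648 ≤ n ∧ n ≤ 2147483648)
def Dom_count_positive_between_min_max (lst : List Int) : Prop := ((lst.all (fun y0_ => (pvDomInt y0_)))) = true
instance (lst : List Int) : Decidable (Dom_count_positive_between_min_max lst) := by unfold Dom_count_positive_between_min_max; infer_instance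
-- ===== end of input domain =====

-- B replaces A's min/max/.index scans and slice-sum with a prefix-sum array of positive
-- counts (the answer becomes a difference of two prefix sums) and first-occurrence
-- argmin/argmax found via lexicographic tuple min/max over enumerate (objective: alternative).

-- ===== PORT A =====
def count_positive_between_min_max (lst : List Int) : Int :=
  if lst = [] then 0
  else
    match PySem.List.min? lst (fun y => y), PySem.List.max? lst (fun y => y) with
    | some min_value, some max_value =>
      match PySem.List.index? lst min_value, PySem.List.index? lst max_value with
      | some min_index, some max_index =>
        let start_index : Int := min (min_index : Int) (max_index : Int) + 1
        let end_index : Int := max (min_index : Int) (max_index : Int)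
        (PySem.List.slice lst (some start_index) (some end_index)).foldl
          (fun acc x => if 0 < x then acc + 1 else acc) (0 : Int)
      | _, _ => 0
    | _, _ => 0

-- ===== PORT B =====
-- Python's min/max on 2-tuples: lexicographic comparison, first extremum kept
def pvLexMin (a b : Int × Int) : Int × Int :=
  if b.1 < a.1 ∨ (b.1 = a.1 ∧ b.2 < a.2) then b else a
def pvLexMax (a b : Int × Int) : Int × Int :=
  if a.1 < b.1 ∨ (a.1 = b.1 ∧ a.2 < b.2) then b else a

def count_positive_between_min_max_alt (lst : List Int) : Int :=
  match lst with
  | [] => 0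
  | x0 :: t =>
    -- pos[k] = number of positives among lst[:k]
    let pa := (x0 :: t).foldl
      (fun (s : List Int × Int) x =>
        let acc := s.2 + (if 0 < x then (1 : Int) else 0); (s.1 ++ [acc], acc)) ([0], 0)
    let pos := pa.1
    -- min((x, i) for i, x in enumerate(lst)) / max((x, -i) ...): fold over the tail from the head
    let mi := (((PySem.List.enumerate t 1).map (fun p => (p.2, p.1))).foldl pvLexMin (x0, 0)).2
    let nma := (((PySem.List.enumerate t 1).map (fun p => (p.2, -p.1))).foldl pvLexMax (x0, 0)).2
    let ma := -nma
    let lo := if mi ≤ ma then mi else ma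
    let hi := if mi ≤ ma then ma else mi
    if lo + 1 ≤ hi then
      PySem.List.pyGetD pos hi 0 - PySem.List.pyGetD pos (lo + 1) 0
    else 0

-- ===== PRECONDITION & SPEC =====
def Spec_count_positive_between_min_max (lst : List Int) (out : Int) : Prop := out = count_positive_between_min_max_alt lst
instance (lst : List Int) (out : Int) : Decidable (Spec_count_positive_between_min_max lst out) := by unfold Spec_count_positive_between_min_max; infer_instance

-- ===== CLAIM (what is proved, stated in full; the proofs are below) =====
def Claim_equal_count_positive_between_min_max : Prop := ∀ (lst : List Int), Dom_count_positive_between_min_max lst → Spec_count_positive_between_min_max lst (count_positive_between_min_max lst)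

-- ===== LEMMAS AND PROOFS =====

theorem pvIndexOf (xs : List Int) (v : Int) (h : v ∈ xs) :
    PySem.List.index? xs v = some (List.idxOf v xs) := by
  induction xs with
  | nil => simp at h
  | cons y ys ih =>
    by_cases hy : y = v
    · subst hy
      rw [PySem.List.index?_cons_self, List.idxOf_cons_self]
    · rw [PySem.List.index?_cons_of_ne (v := v) (xs := ys) hy, ih (by simpa [Ne.symm hy] using h),
        List.idxOf_cons_ne _ hy]
      rfl

-- B's prefix builder appends running counts of positives
theorem pvPosFold (xs : List Int) (pre : List Int) (c : Int) :
    xs.foldl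
      (fun (s : List Int × Int) x =>
        let acc := s.2 + (if 0 < x then (1 : Int) else 0); (s.1 ++ [acc], acc)) (pre, c)
    = (pre ++ (List.range xs.length).map
        (fun k => c + (List.countP (fun z : Int => decide ((0:Int) < z)) (xs.take (k+1)) : Int)),
       c + (List.countP (fun z : Int => decide ((0:Int) < z)) xs : Int)) := by
  induction xs generalizing pre c with
  | nil => simp
  | cons y ys ih =>
    rw [List.foldl_cons, ih]
    have hrng : List.range (ys.length + 1) = 0 :: (List.range ys.length).map (· + 1) := by
      rw [List.range_succ_eq_map]
    simp only [List.length_cons, hrng, List.map_cons, List.map_map, Prod.mk.injEq]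
    constructor
    · rw [List.append_assoc]
      congr 1
      simp only [List.take_succ_cons, List.countP_cons, List.singleton_append, List.cons.injEq]
      constructor
      · simp only [List.take_zero, List.countP_nil]
        by_cases h : (0:Int) < y <;> simp [h]
      · apply List.map_congr_left
        intro k _
        simp only [Function.comp_apply]
        by_cases h : (0:Int) < y
        · simp [h]; ring
        · simp [h]
    · simp only [List.countP_cons]
      by_cases h : (0:Int) < y
      · simp [h]; ring
      · simp [h]

-- the prefix list in the convenient closed form
theorem pvPos (x0 : Int) (t : List Int) :
    ((x0 :: t).foldl
      (fun (s : List Int × Int) x =>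
        let acc := s.2 + (if 0 < x then (1 : Int) else 0); (s.1 ++ [acc], acc)) ([0], 0)).1
    = (List.range ((x0 :: t).length + 1)).map
        (fun k => (List.countP (fun z : Int => decide ((0:Int) < z)) ((x0 :: t).take k) : Int)) := by
  rw [pvPosFold]
  conv_rhs => rw [List.range_succ_eq_map]
  simp [List.map_map, Function.comp, Nat.succ_eq_add_one]

-- Python's min over (value, index) tuples: min value with its FIRST index
theorem pvLexMinFold (t : List Int) (s a i : Int) (h : i < s) :
    ((PySem.List.enumerate t s).map (fun p => (p.2, p.1))).foldl pvLexMin (a, i)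
    = (t.foldl min a,
       if t.foldl min a < a then s + (List.idxOf (t.foldl min a) t : Int) else i) := by
  induction t generalizing s a i with
  | nil => simp [PySem.List.enumerate_nil]
  | cons y ys ih =>
    rw [PySem.List.enumerate_cons, List.map_cons, List.foldl_cons]
    have hstep : pvLexMin (a, i) (y, s) = if y < a then (y, s) else (a, i) := by
      unfold pvLexMin
      by_cases h1 : y < a
      · rw [if_pos (Or.inl h1), if_pos h1]
      · rw [if_neg (by rintro (h2 | ⟨h2, h3⟩) <;> omega), if_neg h1]
    rw [hstep]
    by_cases h1 : y < a
    · rw [if_pos h1, ih (s+1) y s (by omega)]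
      have hle := (PySem.List.foldl_min_le ys y).1
      have hfold : (y :: ys).foldl min a = ys.foldl min y := by
        simp [List.foldl_cons, min_eq_right h1.le]
      rw [hfold]
      have hc : ys.foldl min y < a := by omega
      rw [if_pos hc]
      by_cases h2 : ys.foldl min y < y
      · have hne : y ≠ ys.foldl min y := by omega
        rw [if_pos h2, List.idxOf_cons_ne _ hne, Prod.mk.injEq]
        refine ⟨rfl, ?_⟩
        push_cast [Nat.succ_eq_add_one]; ring
      · have he : ys.foldl min y = y := by omega
        rw [if_neg h2, he, List.idxOf_cons_self]
        simp
    · rw [if_neg h1, ih (s+1) a i (by omega)]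
      have hfold : (y :: ys).foldl min a = ys.foldl min a := by
        simp [List.foldl_cons, min_eq_left (show a ≤ y by omega)]
      rw [hfold]
      by_cases h2 : ys.foldl min a < a
      · have hne : y ≠ ys.foldl min a := by omega
        rw [if_pos h2, if_pos h2, List.idxOf_cons_ne _ hne, Prod.mk.injEq]
        refine ⟨rfl, ?_⟩
        push_cast [Nat.succ_eq_add_one]; ring
      · rw [if_neg h2, if_neg h2]

-- Python's max over (value, -index) tuples: max value with its FIRST index (negated)
theorem pvLexMaxFold (t : List Int) (s a ni : Int) (h : -s < ni) :
    ((PySem.List.enumerate t s).map (fun p => (p.2, -p.1))).foldl pvLexMax (a, ni)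
    = (t.foldl max a,
       if a < t.foldl max a then -(s + (List.idxOf (t.foldl max a) t : Int)) else ni) := by
  induction t generalizing s a ni with
  | nil => simp [PySem.List.enumerate_nil]
  | cons y ys ih =>
    rw [PySem.List.enumerate_cons, List.map_cons, List.foldl_cons]
    have hstep : pvLexMax (a, ni) (y, -s) = if a < y then (y, -s) else (a, ni) := by
      unfold pvLexMax
      by_cases h1 : a < y
      · rw [if_pos (Or.inl h1), if_pos h1]
      · rw [if_neg (by rintro (h2 | ⟨h2, h3⟩) <;> omega), if_neg h1]
    rw [hstep]
    by_cases h1 : a < y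
    · rw [if_pos h1, ih (s+1) y (-s) (by omega)]
      have hle := (PySem.List.le_foldl_max ys y).1
      have hfold : (y :: ys).foldl max a = ys.foldl max y := by
        simp [List.foldl_cons, max_eq_right h1.le]
      rw [hfold]
      have hc : a < ys.foldl max y := by omega
      rw [if_pos hc]
      by_cases h2 : y < ys.foldl max y
      · have hne : y ≠ ys.foldl max y := by omega
        rw [if_pos h2, List.idxOf_cons_ne _ hne, Prod.mk.injEq]
        refine ⟨rfl, ?_⟩
        push_cast [Nat.succ_eq_add_one]; ring
      · have he : ys.foldl max y = y := by omega
        rw [if_neg h2, he, List.idxOf_cons_self]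
        simp
    · rw [if_neg h1, ih (s+1) a ni (by omega)]
      have hfold : (y :: ys).foldl max a = ys.foldl max a := by
        simp [List.foldl_cons, max_eq_left (show y ≤ a by omega)]
      rw [hfold]
      by_cases h2 : a < ys.foldl max a
      · have hne : y ≠ ys.foldl max a := by omega
        rw [if_pos h2, if_pos h2, List.idxOf_cons_ne _ hne, Prod.mk.injEq]
        refine ⟨rfl, ?_⟩
        push_cast [Nat.succ_eq_add_one]; ring
      · rw [if_neg h2, if_neg h2]

-- ===== VERDICT (by name: the statement is the Claim_ definition above) =====
theorem count_positive_between_min_max_spec : Claim_equal_count_positive_between_min_max := by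
  intro lst _
  unfold Spec_count_positive_between_min_max
  match lst with
  | [] => rfl
  | x :: t =>
    set m := t.foldl min x with hm
    set M := t.foldl max x with hM
    have hmmem : m ∈ x :: t := by
      rcases PySem.List.foldl_min_mem t x with h | h
      · rw [hm, h]; exact List.mem_cons_self
      · exact List.mem_cons_of_mem _ h
    have hMmem : M ∈ x :: t := by
      rcases PySem.List.foldl_max_mem t x with h | h
      · rw [hM, h]; exact List.mem_cons_self
      · exact List.mem_cons_of_mem _ h
    set mi := List.idxOf m (x :: t) with hmi
    set Ma := List.idxOf M (x :: t) with hMa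
    have hmiLt : mi < (x :: t).length := List.idxOf_lt_length_of_mem hmmem
    have hMaLt : Ma < (x :: t).length := List.idxOf_lt_length_of_mem hMmem
    set cnt := fun l : List Int => List.countP (fun z : Int => decide ((0:Int) < z)) l with hcnt
    -- A's side: count over the drop/take window
    have hA : count_positive_between_min_max (x :: t)
        = 0 + ((cnt (((x :: t).drop (min mi Ma + 1)).take (max mi Ma - (min mi Ma + 1)))) : Int) := by
      have e1 : min (mi : Int) (Ma : Int) + 1 = ((min mi Ma + 1 : Nat) : Int) := by
        push_cast; omega
      have e2 : max (mi : Int) (Ma : Int) = ((max mi Ma : Nat) : Int) := by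
        push_cast; omega
      simp only [count_positive_between_min_max, if_neg (show ¬(x :: t = []) by simp),
        PySem.List.min?_id_cons, PySem.List.max?_id_cons, ← hm, ← hM,
        pvIndexOf _ _ hmmem, pvIndexOf _ _ hMmem, ← hmi, ← hMa, e1, e2]
      rw [PySem.List.slice_natCast]
      rw [PySem.List.foldl_ite_add_one (p := fun z : Int => (0:Int) < z)]
    -- B's side
    have hB : count_positive_between_min_max_alt (x :: t)
        = if ((min mi Ma : Nat) : Int) + 1 ≤ ((max mi Ma : Nat) : Int) then
            (cnt ((x :: t).take (max mi Ma)) : Int) - (cnt ((x :: t).take (min mi Ma + 1)) : Int)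
          else 0 := by
      simp only [count_positive_between_min_max_alt]
      rw [pvPos, pvLexMinFold t 1 x 0 (by omega), pvLexMaxFold t 1 x 0 (by omega)]
      have hmival : (if t.foldl min x < x then (1:Int) + (List.idxOf (t.foldl min x) t : Int) else 0)
          = (mi : Int) := by
        rw [← hm, hmi]
        by_cases h : m < x
        · have hne : x ≠ m := by omega
          rw [if_pos h, List.idxOf_cons_ne _ hne]
          push_cast; ring
        · have hle := (PySem.List.foldl_min_le t x).1
          have : m = x := by omega
          rw [if_neg h, this, List.idxOf_cons_self]
          simp
      have hmaval : (-(if x < t.foldl max x then -((1:Int) + (List.idxOf (t.foldl max x) t : Int)) else 0))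
          = (Ma : Int) := by
        rw [← hM, hMa]
        by_cases h : x < M
        · have hne : x ≠ M := by omega
          rw [if_pos h, List.idxOf_cons_ne _ hne]
          push_cast; ring
        · have hle := (PySem.List.le_foldl_max t x).1
          have : M = x := by omega
          rw [if_neg h, this, List.idxOf_cons_self]
          simp
      simp only [hmival, hmaval]
      have hlo : (if (mi : Int) ≤ (Ma : Int) then (mi : Int) else (Ma : Int)) = ((min mi Ma : Nat) : Int) := by
        split_ifs with h <;> push_cast <;> omega
      have hhi : (if (mi : Int) ≤ (Ma : Int) then (Ma : Int) else (mi : Int)) = ((max mi Ma : Nat) : Int) := by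
        split_ifs with h <;> push_cast <;> omega
      simp only [hlo, hhi]
      by_cases hc : ((min mi Ma : Nat) : Int) + 1 ≤ ((max mi Ma : Nat) : Int)
      · rw [if_pos hc, if_pos hc]
        have e1 : ((min mi Ma : Nat) : Int) + 1 = ((min mi Ma + 1 : Nat) : Int) := by push_cast; ring
        rw [e1, PySem.List.pyGetD_natCast, PySem.List.pyGetD_natCast]
        have hlen : (List.range ((x :: t).length + 1)).length = (x :: t).length + 1 := by
          simp
        have hget : ∀ k : Nat, k < (x :: t).length + 1 →
            ((List.range ((x :: t).length + 1)).map
              (fun k => (cnt ((x :: t).take k) : Int))).getD k 0 = (cnt ((x :: t).take k) : Int) := by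
          intro k hk
          rw [List.getD_eq_getElem?_getD, List.getElem?_map, List.getElem?_range hk]
          rfl
        rw [hget _ (by omega), hget _ (by omega)]
      · rw [if_neg hc, if_neg hc]
    rw [hA, hB]
    by_cases hc : ((min mi Ma : Nat) : Int) + 1 ≤ ((max mi Ma : Nat) : Int)
    · rw [if_pos hc]
      have hle : min mi Ma + 1 ≤ max mi Ma := by exact_mod_cast hc
      have hsplit : (x :: t).take (max mi Ma)
          = (x :: t).take (min mi Ma + 1) ++ (((x :: t).drop (min mi Ma + 1)).take (max mi Ma - (min mi Ma + 1))) := by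
        have : max mi Ma = (min mi Ma + 1) + (max mi Ma - (min mi Ma + 1)) := by omega
        conv_lhs => rw [this]
        rw [List.take_add]
      rw [hsplit, hcnt]
      simp only [List.countP_append]
      push_cast; ring
    · rw [if_neg hc]
      have : max mi Ma - (min mi Ma + 1) = 0 := by
        have h1 : min mi Ma ≤ max mi Ma := min_le_max
        omega
      rw [this]
      simp [hcnt]
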